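-- pv_equiv track=rewrite | github.com/miliar/Code_Jam_Webscraper | solutions_python/Problem_117/1428.py | scan_col
-- ===== SOURCE A (Python) =====
-- def scan_col(board, col, val):
--   rv = True
--   valCount = 0
--   for j in range(len(board)):
--     rv = rv and (board[j][col] == val or board[j][col] == 0)
--     if board[j][col] == val:
--       valCount += 1
--   return (rv, valCount)
-- ===== SOURCE B (Python) =====
-- def scan_col(board, col, val):
--   freq = {}
--   for row in board:
--     c = row[col]
--     freq[c] = freq.get(c, 0) + 1
--   rv = all(k == val or k == 0 for k in freq)
--   return (rv, freq.get(val, 0))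
-- ===== Notes on version B (the rewrite author's own statement) =====
-- stated objective: alternative
-- what changed: Replaces the fused two-accumulator loop over rows with a frequency dictionary of the column: validity is decided over the distinct values (dict keys) instead of per row, and the count is a single dictionary lookup instead of an accumulator.
import Mathlib
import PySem

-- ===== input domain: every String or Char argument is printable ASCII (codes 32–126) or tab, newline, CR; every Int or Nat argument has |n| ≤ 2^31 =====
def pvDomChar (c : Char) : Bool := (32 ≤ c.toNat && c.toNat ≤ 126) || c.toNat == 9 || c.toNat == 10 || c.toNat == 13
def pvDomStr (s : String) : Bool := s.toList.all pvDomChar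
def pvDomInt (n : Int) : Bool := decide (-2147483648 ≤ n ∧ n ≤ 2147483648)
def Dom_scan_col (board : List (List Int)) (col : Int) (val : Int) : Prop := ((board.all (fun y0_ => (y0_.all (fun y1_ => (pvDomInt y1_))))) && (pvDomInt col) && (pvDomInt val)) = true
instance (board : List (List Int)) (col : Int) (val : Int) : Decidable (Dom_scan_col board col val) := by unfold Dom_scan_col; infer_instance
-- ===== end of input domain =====

-- B replaces the fused two-accumulator row loop with a frequency dictionary of the
-- column: validity is decided over the distinct values (the dict keys), the count is
-- one dictionary lookup; objective: alternative.

-- ===== PORT A =====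
-- literal port of A's fused loop over range(len(board)); board[j][col] via pyGetD
-- (Pre_scan_col guarantees col is in range for every row, j is always in range)
def scan_col (board : List (List Int)) (col : Int) (val : Int) : Bool × Int :=
  (PySem.List.pyRange 0 (board.length : Int) 1).foldl
    (fun st j =>
      let cell := PySem.List.pyGetD (PySem.List.pyGetD board j []) col 0
      (st.1 && (cell == val || cell == 0),
       if cell == val then st.2 + 1 else st.2))
    (true, 0)

-- ===== PORT B =====
-- literal port of B: build the frequency dict of the column (freq[c] = freq.get(c,0)+1),
-- then all() over its keys, and freq.get(val, 0) for the count
def scan_col_alt (board : List (List Int)) (col : Int) (val : Int) : Bool × Int :=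
  let freq := board.foldl
    (fun (d : PySem.Dict Int Int) row =>
      let c := PySem.List.pyGetD row col 0
      d.insert c (d.getD c 0 + 1))
    PySem.Dict.empty
  let rv := freq.keys.all (fun k => k == val || k == 0)
  (rv, freq.getD val 0)

-- ===== PRECONDITION & SPEC =====
-- Pre_ excludes exactly the inputs where Python's board[j][col] raises IndexError:
-- col must be a valid (possibly negative) index into every row of the board.
def Pre_scan_col (board : List (List Int)) (col : Int) (val : Int) : Prop :=
  ∀ row ∈ board, PySem.Raise.InRange row.length col
instance (board : List (List Int)) (col : Int) (val : Int) : Decidable (Pre_scan_col board col val) := by unfold Pre_scan_col; infer_instance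

def pvWitness_scan_col : List (List Int) × Int × Int := ([[1, 0], [2, 1], [0, 1]], 1, 1)

def Spec_scan_col (board : List (List Int)) (col : Int) (val : Int) (out : Bool × Int) : Prop := out = scan_col_alt board col val
instance (board : List (List Int)) (col : Int) (val : Int) (out : Bool × Int) : Decidable (Spec_scan_col board col val out) := by unfold Spec_scan_col; infer_instance

-- ===== CLAIM (what is proved, stated in full; the proofs are below) =====
def Claim_equal_scan_col : Prop := ∀ (board : List (List Int)) (col : Int) (val : Int), Dom_scan_col board col val → Pre_scan_col board col val → Spec_scan_col board col val (scan_col board col val)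

-- ===== LEMMAS AND PROOFS =====

-- A's loop over the rows, with generalized accumulator, in terms of the column list.
theorem scan_col_foldl_column (board : List (List Int)) (col val : Int) (b : Bool) (n : Int) :
    board.foldl
      (fun (st : Bool × Int) row =>
        let cell := PySem.List.pyGetD row col 0
        (st.1 && (cell == val || cell == 0),
         if cell == val then st.2 + 1 else st.2))
      (b, n)
    = (b && (board.map (fun row => PySem.List.pyGetD row col 0)).all (fun c => c == val || c == 0),
       n + ((board.map (fun row => PySem.List.pyGetD row col 0)).count val : Int)) := by
  induction board generalizing b n with
  | nil => simp
  | cons r rest ih =>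
      simp only [List.foldl_cons, ih, List.map_cons, List.all_cons, List.count_cons]
      refine Prod.ext (by rw [Bool.and_assoc]) ?_
      by_cases h : PySem.List.pyGetD r col 0 = val
      · simp [h]; omega
      · simp [h]

-- all over the distinct elements equals all over the list itself
theorem all_ofList_eq_all (xs : List Int) (p : Int → Bool) :
    (PySem.Set.ofList xs).all p = xs.all p := by
  rw [Bool.eq_iff_iff]
  simp only [List.all_eq_true]
  constructor
  · intro h x hx; exact h x ((PySem.Set.mem_ofList xs x).mpr hx)
  · intro h x hx; exact h x ((PySem.Set.mem_ofList xs x).mp hx)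

-- B's dict-building loop is Counter(column)
theorem scan_col_freq_eq_counter (board : List (List Int)) (col : Int) :
    board.foldl
      (fun (d : PySem.Dict Int Int) row =>
        let c := PySem.List.pyGetD row col 0
        d.insert c (d.getD c 0 + 1))
      PySem.Dict.empty
    = PySem.Dict.counter (board.map (fun row => PySem.List.pyGetD row col 0)) := by
  rw [← PySem.Dict.foldl_insert_getD_add_one_eq_counter, List.foldl_map]

-- ===== VERDICT (by name: the statement is the Claim_ definition above) =====
theorem scan_col_spec : Claim_equal_scan_col := by
  intro board col val _ _
  show scan_col board col val = scan_col_alt board col val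
  unfold scan_col scan_col_alt
  rw [PySem.List.foldl_pyRange_zero_pyGetD' board []
        (fun (st : Bool × Int) row =>
          let cell := PySem.List.pyGetD row col 0
          (st.1 && (cell == val || cell == 0),
           if cell == val then st.2 + 1 else st.2)) (true, 0)]
  rw [scan_col_foldl_column, scan_col_freq_eq_counter]
  simp [PySem.Dict.getD_counter, PySem.Dict.keys_counter, all_ofList_eq_all]
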